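-- pv_equiv track=rewrite | github.com/CesarL07/Computacion | #16_Problemas_Tarea_Programacion_Dictionaries.py | Encontrar_Max_Min
-- ===== SOURCE A (Python) =====
-- def Encontrar_Max_Min(diccionario):
--     L0=[]
--     Lista_Max_Min=[]
--     for values in diccionario.values():
--         L0.append(values)
--     for _ in L0:
--         Lista_Max_Min=[max(L0),min(L0)]
--     return Lista_Max_Min
-- ===== SOURCE B (Python) =====
-- def Encontrar_Max_Min(diccionario):
--     vs = list(diccionario.values())
--     if not vs:
--         return []
--     s = sorted(vs)
--     return [s[-1], s[0]]
-- ===== Notes on version B (the rewrite author's own statement) =====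
-- stated objective: faster
-- what changed: Replaces the append loop plus a redundant loop that rebuilds [max,min] by repeated full scans once per element with a single sort of the values, reading the maximum from the last and the minimum from the first element.
import Mathlib
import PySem

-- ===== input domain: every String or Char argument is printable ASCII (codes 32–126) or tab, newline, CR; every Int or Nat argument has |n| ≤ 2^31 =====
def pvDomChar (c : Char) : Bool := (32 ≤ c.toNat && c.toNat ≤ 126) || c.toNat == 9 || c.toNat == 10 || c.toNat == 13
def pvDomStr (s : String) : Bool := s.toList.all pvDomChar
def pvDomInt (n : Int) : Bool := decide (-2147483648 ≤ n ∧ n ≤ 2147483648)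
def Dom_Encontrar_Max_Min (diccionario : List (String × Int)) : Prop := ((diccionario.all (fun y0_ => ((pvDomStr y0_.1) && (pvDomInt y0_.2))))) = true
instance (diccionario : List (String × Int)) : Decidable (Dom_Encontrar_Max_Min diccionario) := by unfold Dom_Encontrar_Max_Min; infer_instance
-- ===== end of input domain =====

-- B replaces A's loop that recomputes max/min by full scans once per element with a single sort of the values (faster in a timing run).

-- ===== PORT A =====
-- A: build L0 by appending each value, then for each element of L0 set the result to [max(L0), min(L0)].
def Encontrar_Max_Min (diccionario : List (String × Int)) : List Int :=
  let L0 := diccionario.foldl (fun acc kv => acc ++ [kv.2]) []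
  L0.foldl (fun _ _ =>
    match PySem.List.max? L0 (fun x => x), PySem.List.min? L0 (fun x => x) with
    | some M, some m => [M, m]
    | _, _ => []) []

-- ===== PORT B =====
-- B: collect the values; if empty return [], else sort and return [last, first].
def Encontrar_Max_Min_alt (diccionario : List (String × Int)) : List Int :=
  let vs := diccionario.map Prod.snd
  if vs = [] then []
  else
    let s := PySem.List.sorted vs (fun x => x) false
    [PySem.List.pyGetD s (-1) 0, PySem.List.pyGetD s 0 0]

-- ===== PRECONDITION & SPEC =====
def Spec_Encontrar_Max_Min (diccionario : List (String × Int)) (out : List Int) : Prop := out = Encontrar_Max_Min_alt diccionario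
instance (diccionario : List (String × Int)) (out : List Int) : Decidable (Spec_Encontrar_Max_Min diccionario out) := by unfold Spec_Encontrar_Max_Min; infer_instance

-- ===== CLAIM (what is proved, stated in full; the proofs are below) =====
def Claim_equal_Encontrar_Max_Min : Prop := ∀ (diccionario : List (String × Int)), Dom_Encontrar_Max_Min diccionario → Spec_Encontrar_Max_Min diccionario (Encontrar_Max_Min diccionario)

-- ===== LEMMAS AND PROOFS =====

-- a fold with a constant-valued body over a nonempty list returns that constant
theorem foldl_const_of_ne_nil {α β : Type} (l : List α) (h : l ≠ []) (c init : β) :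
    l.foldl (fun _ _ => c) init = c := by
  induction l generalizing init with
  | nil => exact absurd rfl h
  | cons a t ih =>
    cases t with
    | nil => rfl
    | cons b u => exact ih (by simp) c

-- the head of sorted(vs) is the minimum value of vs
theorem head_sorted_eq_min {vs : List Int} {m h : Int} {t : List Int}
    (hs : PySem.List.sorted vs (fun x => x) false = h :: t)
    (hm : PySem.List.min? vs (fun x => x) = some m) : h = m := by
  have hmem : h ∈ vs := by
    have : h ∈ PySem.List.sorted vs (fun x => x) false := by rw [hs]; exact List.mem_cons_self
    exact (PySem.List.mem_sorted _ _ _ _).mp this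
  have h1 : m ≤ h := PySem.List.min?_isMin hm h hmem
  have h2 : h ≤ m := PySem.List.key_head_sorted_le vs (fun x => x) hs m (PySem.List.min?_mem hm)
  omega

-- the last element of sorted(vs) is the maximum value of vs
theorem getLast_sorted_eq_max {vs : List Int} {M : Int} {l : List Int}
    (hs : PySem.List.sorted vs (fun x => x) false = l) (hne : l ≠ [])
    (hM : PySem.List.max? vs (fun x => x) = some M) :
    l.getLast hne = M := by
  have hlast_mem : l.getLast hne ∈ vs := by
    refine (PySem.List.mem_sorted vs (fun x : Int => x) false _).mp ?_
    rw [hs]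
    exact List.getLast_mem hne
  have h1 : l.getLast hne ≤ M := PySem.List.max?_isMax hM _ hlast_mem
  have hMs : M ∈ l := by
    rw [← hs]; exact (PySem.List.mem_sorted _ _ _ _).mpr (PySem.List.max?_mem hM)
  obtain ⟨p, hp, hpe⟩ := List.mem_iff_getElem.mp hMs
  have hmono : l[p] ≤ l[l.length - 1]'(by omega) := by
    have := PySem.List.key_sorted_getElem_mono vs (fun x => x)
      (p := p) (q := l.length - 1) (by omega) (by rw [hs]; omega)
    simpa [hs] using this
  have h2 : M ≤ l.getLast hne := by
    rw [List.getLast_eq_getElem]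
    omega
  omega

-- ===== VERDICT (by name: the statement is the Claim_ definition above) =====
theorem Encontrar_Max_Min_spec : Claim_equal_Encontrar_Max_Min := by
  intro d _
  unfold Spec_Encontrar_Max_Min Encontrar_Max_Min Encontrar_Max_Min_alt
  simp only [PySem.List.foldl_append_singleton_eq_map, List.nil_append]
  set vs := d.map Prod.snd with hvs
  by_cases hnil : vs = []
  · simp [hnil]
  · rw [if_neg hnil]
    rcases hM : PySem.List.max? vs (fun x => x) with _ | M
    · exact absurd ((PySem.List.max?_eq_none_iff vs (fun x => x)).mp hM) hnil
    rcases hm : PySem.List.min? vs (fun x => x) with _ | m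
    · exact absurd ((PySem.List.min?_eq_none_iff vs (fun x => x)).mp hm) hnil
    rw [foldl_const_of_ne_nil vs hnil]
    have hsne : PySem.List.sorted vs (fun x => x) false ≠ [] := by
      simpa [PySem.List.sorted_eq_nil_iff] using hnil
    rcases hs : PySem.List.sorted vs (fun x => x) false with _ | ⟨h, t⟩
    · exact absurd hs hsne
    have hh : h = m := head_sorted_eq_min hs hm
    have hL : (h :: t).getLast (by simp) = M := getLast_sorted_eq_max hs (by simp) hM
    have hred : (match (some M : Option Int), (some m : Option Int) with
        | some M, some m => [M, m] | _, _ => ([] : List Int)) = [M, m] := rfl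
    rw [hred, PySem.List.pyGetD_neg_one (h :: t) 0 (by simp),
        PySem.List.pyGetD_zero_cons, hL, hh]
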